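-- pv_equiv track=rewrite | github.com/tiqwab/example | udacity-cs262/problem3/quiz-infinite-mind-reading.py | cfgcheck
-- ===== SOURCE A (Python) =====
-- def cfgcheck(grammar, symbol, visited, tss):
--     if symbol in list(map(lambda x: x[0], visited)):
--         prev_tss = list(filter(lambda x: x[0] == symbol, visited))[0][1]
--         return len(tss) - len(prev_tss) > 0
--
--     visited.append((symbol, tss))
--     current_grammars = list(filter(lambda x: x[0] == symbol, grammar))
--     for gr in current_grammars:
--         new_tss = list(filter(lambda x: is_ts(x, grammar), gr[1]))
--         for nts in [x for x in filter(lambda x: not is_ts(x, grammar), gr[1])]: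
--             if cfgcheck(grammar, nts, visited, tss + new_tss):
--                 return True
--     return False
--
-- def is_ts(s, grammar):
--     for x in grammar:
--         if x[0] == s:
--             return False
--     return True
-- ===== SOURCE B (Python) =====
-- # Iterative DFS with an explicit stack of (symbol, accumulated_tss) frames,
-- # replacing A's recursion; same return value, same mutation of `visited`.
-- def cfgcheck(grammar, symbol, visited, tss):
--     heads = set(h for h, _ in grammar)
--     stack = [(symbol, tss)]
--     while stack:
--         sym, ts = stack.pop()
--         rec = next((v for v in visited if v[0] == sym), None)
--         if rec is not None:
--             if len(ts) > len(rec[1]):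
--                 return True
--             continue
--         visited.append((sym, ts))
--         frames = [(x, ts + [t for t in rhs if t not in heads])
--                   for head, rhs in grammar if head == sym
--                   for x in rhs if x in heads]
--         stack.extend(reversed(frames))
--     return False
-- ===== Notes on version B (the rewrite author's own statement) =====
-- stated objective: alternative
-- what changed: A's recursive pre-order DFS over the grammar (with per-call filter scans and an is_ts helper that rescans the grammar) is replaced by an iterative DFS driven by an explicit LIFO stack of (symbol, accumulated_tss) frames, with the terminal test done against a head-set built once.
import Mathlib
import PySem

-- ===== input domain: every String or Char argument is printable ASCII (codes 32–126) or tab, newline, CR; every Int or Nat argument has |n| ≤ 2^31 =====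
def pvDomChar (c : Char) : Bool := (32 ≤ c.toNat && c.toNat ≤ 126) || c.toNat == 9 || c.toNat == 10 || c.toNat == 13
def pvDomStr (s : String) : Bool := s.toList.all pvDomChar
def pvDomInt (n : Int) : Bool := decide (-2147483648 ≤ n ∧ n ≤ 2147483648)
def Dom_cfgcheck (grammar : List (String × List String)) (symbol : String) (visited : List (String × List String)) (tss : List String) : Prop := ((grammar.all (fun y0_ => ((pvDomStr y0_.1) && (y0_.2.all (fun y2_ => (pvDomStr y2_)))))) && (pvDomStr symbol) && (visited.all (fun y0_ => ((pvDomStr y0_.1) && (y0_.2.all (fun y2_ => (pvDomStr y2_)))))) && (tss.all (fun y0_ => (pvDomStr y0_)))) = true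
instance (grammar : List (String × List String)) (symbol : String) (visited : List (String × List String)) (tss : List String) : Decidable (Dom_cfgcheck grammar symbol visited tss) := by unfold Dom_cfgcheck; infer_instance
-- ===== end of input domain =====

-- B replaces A's recursive DFS by an explicit-stack iterative DFS (head-set precomputed);
-- the equivalence proved is about the RETURN value only (both Pythons append to `visited` in place, identically).


-- ===== PORT A =====
-- helper is_ts(s, grammar): scans the grammar, False at the first head equal to s
def is_ts (s : String) : List (String × List String) → Bool
  | [] => true
  | x :: xs => if x.1 == s then false else is_ts s xs

-- A's recursion mutates `visited` (shared across branches), so the port threads the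
-- visited list through and returns it alongside the Bool; fuel = recursion depth,
-- which only makes the same computation total (sufficiency is proved below: with
-- fuel grammar.length + 1 the `none` case is never reached).
mutual
def cfgAF : Nat → List (String × List String) → String → List (String × List String) → List String → Option (Bool × List (String × List String))
  | 0, _, _, _, _ => none
  | f + 1, g, s, vis, ts =>
    if (vis.map Prod.fst).contains s then
      -- prev_tss = first pair of visited with matching key; guard makes it total
      some (decide ((ts.length : Int) - (((vis.filter (fun x => x.1 == s)).headD ("", [])).2.length : Int) > 0), vis)
    else
      goProdsF f g s ts (g.filter (fun x => x.1 == s)) (vis ++ [(s, ts)])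
  termination_by f => (f, 0, 0)

def goProdsF : Nat → List (String × List String) → String → List String → List (String × List String) → List (String × List String) → Option (Bool × List (String × List String))
  | _, _, _, _, [], vis => some (false, vis)
  | f, g, s, ts, gr :: rest, vis =>
    match goNtsF f g (ts ++ gr.2.filter (fun x => is_ts x g)) (gr.2.filter (fun x => !is_ts x g)) vis with
    | none => none
    | some (true, v) => some (true, v)
    | some (false, v) => goProdsF f g s ts rest v
  termination_by f _ _ _ prods _ => (f, 2, prods.length)

def goNtsF : Nat → List (String × List String) → List String → List String → List (String × List String) → Option (Bool × List (String × List String))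
  | _, _, _, [], vis => some (false, vis)
  | f, g, ts', n :: rest, vis =>
    match cfgAF f g n vis ts' with
    | none => none
    | some (true, v) => some (true, v)
    | some (false, v) => goNtsF f g ts' rest v
  termination_by f _ _ ntss _ => (f, 1, ntss.length)
end

def cfgcheck (grammar : List (String × List String)) (symbol : String) (visited : List (String × List String)) (tss : List String) : Bool :=
  ((cfgAF (grammar.length + 1) grammar symbol visited tss).getD (false, visited)).1

-- ===== PORT B =====
-- number of grammar heads not yet recorded in vis (termination measure for the stack loop)
def muB (g : List (String × List String)) (vis : List (String × List String)) : Nat :=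
  ((PySem.List.dedup (g.map Prod.fst)).filter (fun h => !((vis.map Prod.fst).contains h))).length

theorem muB_append_head_lt (g : List (String × List String)) (vis : List (String × List String))
    (s : String) (ts : List String) (hhead : s ∈ g.map Prod.fst)
    (hnv : ¬ s ∈ vis.map Prod.fst) :
    muB g (vis ++ [(s, ts)]) < muB g vis := by
  unfold muB
  have hsub : ((PySem.List.dedup (g.map Prod.fst)).filter (fun h => !(((vis ++ [(s, ts)]).map Prod.fst).contains h))).Sublist
      ((PySem.List.dedup (g.map Prod.fst)).filter (fun h => !((vis.map Prod.fst).contains h))) := by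
    apply List.monotone_filter_right
    intro h hh
    simp only [Bool.not_eq_eq_eq_not, Bool.not_true, List.contains_eq_mem, decide_eq_false_iff_not,
      List.map_append, List.mem_append] at hh ⊢
    tauto
  rcases (List.Sublist.length_le hsub).lt_or_eq with h | h
  · exact h
  · exfalso
    have heq := hsub.eq_of_length h
    have hsmem : s ∈ (PySem.List.dedup (g.map Prod.fst)).filter (fun h => !((vis.map Prod.fst).contains h)) := by
      simp only [List.mem_filter, PySem.List.mem_dedup, Bool.not_eq_eq_eq_not, Bool.not_true,
        List.contains_eq_mem, decide_eq_false_iff_not]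
      exact ⟨hhead, hnv⟩
    rw [← heq] at hsmem
    simp only [List.mem_filter, Bool.not_eq_eq_eq_not, Bool.not_true, List.contains_eq_mem,
      decide_eq_false_iff_not, List.map_append, List.mem_append, List.map_cons, List.mem_cons] at hsmem
    exact hsmem.2 (Or.inr (by simp))

theorem muB_append_nonhead_eq (g : List (String × List String)) (vis : List (String × List String))
    (s : String) (ts : List String) (hhead : ¬ s ∈ g.map Prod.fst) :
    muB g (vis ++ [(s, ts)]) = muB g vis := by
  unfold muB
  congr 1
  apply List.filter_congr
  intro h hh
  have hne : h ≠ s := by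
    intro he; exact hhead (he ▸ ((PySem.List.mem_dedup _ _).mp hh))
  simp only [List.map_append, List.contains_eq_mem, List.mem_append, List.map_cons, List.mem_cons]
  simp [hne]

theorem filterB_eq_nil_of_nonhead (g : List (String × List String)) (s : String)
    (hhead : ¬ s ∈ g.map Prod.fst) : g.filter (fun x => x.1 == s) = [] := by
  rw [List.filter_eq_nil_iff]
  intro x hx hmem
  exact hhead (List.mem_map.mpr ⟨x, hx, by simpa using hmem⟩)

-- one expansion step: all frames of sym's productions, in production order
def framesB (g : List (String × List String)) (heads : PySem.Set String) (ts : List String) (sym : String) : List (String × List String) :=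
  (g.filter (fun x => x.1 == sym)).flatMap (fun gr =>
    (gr.2.filter (fun x => PySem.Set.contains heads x)).map
      (fun x => (x, ts ++ gr.2.filter (fun t => !PySem.Set.contains heads t))))

-- the while loop: pop a frame from the head of the stack
def loopB (g : List (String × List String)) (heads : PySem.Set String)
    (vis : List (String × List String)) (stack : List (String × List String)) : Bool :=
  match stack with
  | [] => false
  | (sym, ts) :: rest =>
    match hfind : vis.find? (fun v => v.1 == sym) with
    | some r => if r.2.length < ts.length then true else loopB g heads vis rest
    | none => loopB g heads (vis ++ [(sym, ts)]) (framesB g heads ts sym ++ rest)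
  termination_by (muB g vis, stack.length)
  decreasing_by
  · exact Prod.Lex.right _ (Nat.lt_succ_self _)
  · by_cases hh : sym ∈ g.map Prod.fst
    · exact Prod.Lex.left _ _ (muB_append_head_lt g vis sym ts hh (by
        intro hmem
        rcases List.mem_map.mp hmem with ⟨v, hv, hveq⟩
        have := List.find?_eq_none.mp hfind v hv
        simp [hveq] at this))
    · have h1 : framesB g heads ts sym = [] := by
        unfold framesB; rw [filterB_eq_nil_of_nonhead g sym hh]; rfl
      rw [muB_append_nonhead_eq g vis sym ts hh, h1]
      exact Prod.Lex.right _ (Nat.lt_succ_self _)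

def cfgcheck_alt (grammar : List (String × List String)) (symbol : String) (visited : List (String × List String)) (tss : List String) : Bool :=
  loopB grammar (PySem.Set.ofList (grammar.map Prod.fst)) visited [(symbol, tss)]

-- ===== PRECONDITION & SPEC =====
def Spec_cfgcheck (grammar : List (String × List String)) (symbol : String) (visited : List (String × List String)) (tss : List String) (out : Bool) : Prop := out = cfgcheck_alt grammar symbol visited tss
instance (grammar : List (String × List String)) (symbol : String) (visited : List (String × List String)) (tss : List String) (out : Bool) : Decidable (Spec_cfgcheck grammar symbol visited tss out) := by unfold Spec_cfgcheck; infer_instance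

-- ===== CLAIM (what is proved, stated in full; the proofs are below) =====
def Claim_equal_cfgcheck : Prop := ∀ (grammar : List (String × List String)) (symbol : String) (visited : List (String × List String)) (tss : List String), Dom_cfgcheck grammar symbol visited tss → Spec_cfgcheck grammar symbol visited tss (cfgcheck grammar symbol visited tss)

-- ===== LEMMAS AND PROOFS =====

theorem muB_append_le (g : List (String × List String)) (vis ext : List (String × List String)) :
    muB g (vis ++ ext) ≤ muB g vis := by
  unfold muB
  apply List.Sublist.length_le
  apply List.monotone_filter_right
  intro h hh
  simp only [Bool.not_eq_eq_eq_not, Bool.not_true, List.contains_eq_mem, decide_eq_false_iff_not,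
    List.map_append, List.mem_append] at hh ⊢
  tauto


-- ---- bookkeeping lemmas relating the two ports' primitive tests ----

theorem contains_ofList_heads (l : List String) (x : String) :
    PySem.Set.contains (PySem.Set.ofList l) x = l.contains x := by
  simp [pysem]

theorem is_ts_eq (x : String) (g : List (String × List String)) :
    is_ts x g = !((g.map Prod.fst).contains x) := by
  induction g with
  | nil => rfl
  | cons y ys ih =>
    simp only [is_ts, List.map_cons, List.contains_cons]
    by_cases h : y.1 = x
    · simp [h]
    · simp only [beq_iff_eq, h, if_false, ih, Bool.not_or]
      have : (x == y.1) = false := by simp [Ne.symm h]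
      simp [this]

-- A-side description of one expansion's frames, production by production
def framesAll (g : List (String × List String)) (ts : List String)
    (prods : List (String × List String)) : List (String × List String) :=
  prods.flatMap (fun gr =>
    (gr.2.filter (fun x => !is_ts x g)).map
      (fun n => (n, ts ++ gr.2.filter (fun t => is_ts t g))))

theorem framesB_eq (g : List (String × List String)) (ts : List String) (sym : String) :
    framesB g (PySem.Set.ofList (g.map Prod.fst)) ts sym
      = framesAll g ts (g.filter (fun x => x.1 == sym)) := by
  unfold framesB framesAll
  apply List.flatMap_congr
  intro gr _
  have h1 : gr.2.filter (fun x => PySem.Set.contains (PySem.Set.ofList (g.map Prod.fst)) x)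
      = gr.2.filter (fun x => !is_ts x g) :=
    List.filter_congr (fun x _ => by rw [contains_ofList_heads, is_ts_eq]; simp)
  have h2 : gr.2.filter (fun t => !PySem.Set.contains (PySem.Set.ofList (g.map Prod.fst)) t)
      = gr.2.filter (fun t => is_ts t g) :=
    List.filter_congr (fun x _ => by rw [contains_ofList_heads, is_ts_eq])
  simp only [h1, h2]


-- step lemmas for loopB (unfold one loop iteration)
theorem loopB_nil (g : List (String × List String)) (H : PySem.Set String)
    (vis : List (String × List String)) : loopB g H vis [] = false := by
  rw [loopB]

theorem loopB_hit (g : List (String × List String)) (H : PySem.Set String)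
    (vis : List (String × List String)) (sym : String) (ts : List String)
    (rest : List (String × List String)) (r : String × List String)
    (hf : vis.find? (fun v => v.1 == sym) = some r) (hlt : r.2.length < ts.length) :
    loopB g H vis ((sym, ts) :: rest) = true := by
  rw [loopB, hf]; simp [hlt]

theorem loopB_skip (g : List (String × List String)) (H : PySem.Set String)
    (vis : List (String × List String)) (sym : String) (ts : List String)
    (rest : List (String × List String)) (r : String × List String)
    (hf : vis.find? (fun v => v.1 == sym) = some r) (hlt : ¬ r.2.length < ts.length) :
    loopB g H vis ((sym, ts) :: rest) = loopB g H vis rest := by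
  rw [loopB, hf]; simp [hlt]

theorem loopB_expand (g : List (String × List String)) (H : PySem.Set String)
    (vis : List (String × List String)) (sym : String) (ts : List String)
    (rest : List (String × List String))
    (hf : vis.find? (fun v => v.1 == sym) = none) :
    loopB g H vis ((sym, ts) :: rest)
      = loopB g H (vis ++ [(sym, ts)]) (framesB g H ts sym ++ rest) := by
  rw [loopB, hf]

-- relating A's membership test to B's find?
theorem find?_some_of_contains (vis : List (String × List String)) (s : String)
    (hc : (vis.map Prod.fst).contains s = true) :
    ∃ r, vis.find? (fun v => v.1 == s) = some r ∧
      (vis.filter (fun x => x.1 == s)).headD ("", []) = r := by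
  have hmem : s ∈ vis.map Prod.fst := by simpa [List.contains_eq_mem] using hc
  rcases List.mem_map.mp hmem with ⟨x, hx, hxs⟩
  have hs : (vis.find? (fun v => v.1 == s)).isSome := by
    rw [List.find?_isSome]
    exact ⟨x, hx, by simp [hxs]⟩
  rcases Option.isSome_iff_exists.mp hs with ⟨r, hr⟩
  refine ⟨r, hr, ?_⟩
  have hh : (vis.filter (fun x => x.1 == s)).head? = some r := by
    rw [List.head?_filter, hr]
  cases hfil : vis.filter (fun x => x.1 == s) with
  | nil => rw [hfil] at hh; simp at hh
  | cons a tl =>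
    rw [hfil] at hh
    simp at hh
    simp [hh]

theorem find?_none_of_not_contains (vis : List (String × List String)) (s : String)
    (hc : (vis.map Prod.fst).contains s = false) :
    vis.find? (fun v => v.1 == s) = none := by
  rw [List.find?_eq_none]
  intro x hx
  simp only [beq_iff_eq]
  intro hxs
  have : s ∈ vis.map Prod.fst := List.mem_map.mpr ⟨x, hx, hxs⟩
  simp [List.contains_eq_mem, this] at hc

-- ---- simulation: A's recursion against B's stack loop, by fuel induction ----
def LcfgP (f : Nat) : Prop := ∀ (g : List (String × List String)) (s : String)
    (vis : List (String × List String)) (ts : List String) (b : Bool)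
    (v : List (String × List String)), cfgAF f g s vis ts = some (b, v) →
    ∀ rest, loopB g (PySem.Set.ofList (g.map Prod.fst)) vis ((s, ts) :: rest)
      = if b then true else loopB g (PySem.Set.ofList (g.map Prod.fst)) v rest

def LntsP (f : Nat) : Prop := ∀ (g : List (String × List String)) (ts' : List String)
    (ntss : List String) (vis : List (String × List String)) (b : Bool)
    (v : List (String × List String)), goNtsF f g ts' ntss vis = some (b, v) →
    ∀ rest, loopB g (PySem.Set.ofList (g.map Prod.fst)) vis (ntss.map (fun n => (n, ts')) ++ rest)
      = if b then true else loopB g (PySem.Set.ofList (g.map Prod.fst)) v rest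

def LprodsP (f : Nat) : Prop := ∀ (g : List (String × List String)) (s : String)
    (ts : List String) (prods : List (String × List String))
    (vis : List (String × List String)) (b : Bool) (v : List (String × List String)),
    goProdsF f g s ts prods vis = some (b, v) →
    ∀ rest, loopB g (PySem.Set.ofList (g.map Prod.fst)) vis (framesAll g ts prods ++ rest)
      = if b then true else loopB g (PySem.Set.ofList (g.map Prod.fst)) v rest

theorem Lcfg_zero : LcfgP 0 := by
  intro g s vis ts b v h
  simp [cfgAF] at h

theorem Lcfg_succ (f : Nat) (IH : LprodsP f) : LcfgP (f + 1) := by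
  intro g s vis ts b v h rest
  simp only [cfgAF] at h
  by_cases hc : (vis.map Prod.fst).contains s = true
  · rw [if_pos hc] at h
    cases Option.some.inj h
    rcases find?_some_of_contains vis s hc with ⟨r, hfr, hrd⟩
    rw [hrd]
    have hdec : (decide ((ts.length : Int) - (r.2.length : Int) > 0))
        = decide (r.2.length < ts.length) := decide_eq_decide.mpr (by omega)
    rw [hdec]
    by_cases hlt : r.2.length < ts.length
    · rw [loopB_hit g _ vis s ts rest r hfr hlt]
      simp [hlt]
    · rw [loopB_skip g _ vis s ts rest r hfr hlt]
      simp [hlt]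
  · rw [if_neg hc] at h
    rw [loopB_expand g _ vis s ts rest
      (find?_none_of_not_contains vis s (Bool.eq_false_iff.mpr (fun hne => hc hne)))]
    rw [framesB_eq]
    exact IH g s ts (g.filter (fun x => x.1 == s)) (vis ++ [(s, ts)]) b v h rest

theorem Lnts_step (f : Nat) (hcfg : LcfgP f) : LntsP f := by
  intro g ts' ntss
  induction ntss with
  | nil =>
    intro vis b v h rest
    simp only [goNtsF] at h
    cases Option.some.inj h
    simp
  | cons n rest' ih =>
    intro vis b v h rest
    simp only [goNtsF] at h
    cases hcall : cfgAF f g n vis ts' with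
    | none => rw [hcall] at h; simp at h
    | some pr =>
      obtain ⟨b1, v1⟩ := pr
      rw [hcall] at h
      cases b1 with
      | true =>
        simp at h
        obtain ⟨hb, hv⟩ := h
        subst hb hv
        have h1 := hcfg g n vis ts' true v1 hcall (rest'.map (fun n => (n, ts')) ++ rest)
        simp at h1 ⊢
        simpa using h1
      | false =>
        simp at h
        have h1 := hcfg g n vis ts' false v1 hcall (rest'.map (fun n => (n, ts')) ++ rest)
        simp at h1
        have h2 := ih v1 b v h rest
        simp only [List.map_cons, List.cons_append]
        rw [h1, h2]

theorem Lprods_step (f : Nat) (hnts : LntsP f) : LprodsP f := by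
  intro g s ts prods
  induction prods with
  | nil =>
    intro vis b v h rest
    simp only [goProdsF] at h
    cases Option.some.inj h
    simp [framesAll]
  | cons gr rest' ih =>
    intro vis b v h rest
    simp only [goProdsF] at h
    cases hcall : goNtsF f g (ts ++ gr.2.filter (fun x => is_ts x g))
        (gr.2.filter (fun x => !is_ts x g)) vis with
    | none => rw [hcall] at h; simp at h
    | some pr =>
      obtain ⟨b1, v1⟩ := pr
      rw [hcall] at h
      have hframes : framesAll g ts (gr :: rest')
          = (gr.2.filter (fun x => !is_ts x g)).map
              (fun n => (n, ts ++ gr.2.filter (fun t => is_ts t g))) ++ framesAll g ts rest' := by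
        simp [framesAll]
      cases b1 with
      | true =>
        simp at h
        obtain ⟨hb, hv⟩ := h
        subst hb hv
        have h1 := hnts g (ts ++ gr.2.filter (fun x => is_ts x g))
          (gr.2.filter (fun x => !is_ts x g)) vis true v1 hcall (framesAll g ts rest' ++ rest)
        simp at h1 ⊢
        rw [hframes, List.append_assoc]
        simpa using h1
      | false =>
        simp at h
        have h1 := hnts g (ts ++ gr.2.filter (fun x => is_ts x g))
          (gr.2.filter (fun x => !is_ts x g)) vis false v1 hcall (framesAll g ts rest' ++ rest)
        simp at h1
        have h2 := ih v1 b v h rest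
        rw [hframes, List.append_assoc, h1, h2]

theorem sim_all (f : Nat) : LcfgP f ∧ LntsP f ∧ LprodsP f := by
  induction f with
  | zero => exact ⟨Lcfg_zero, Lnts_step 0 Lcfg_zero, Lprods_step 0 (Lnts_step 0 Lcfg_zero)⟩
  | succ f ih =>
    have hc := Lcfg_succ f ih.2.2
    exact ⟨hc, Lnts_step _ hc, Lprods_step _ (Lnts_step _ hc)⟩

-- ---- the visited list only ever grows (by appending) ----
def GcfgP (f : Nat) : Prop := ∀ (g : List (String × List String)) (s : String)
    (vis : List (String × List String)) (ts : List String) (b : Bool)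
    (v : List (String × List String)), cfgAF f g s vis ts = some (b, v) → ∃ ext, v = vis ++ ext

def GntsP (f : Nat) : Prop := ∀ (g : List (String × List String)) (ts' : List String)
    (ntss : List String) (vis : List (String × List String)) (b : Bool)
    (v : List (String × List String)), goNtsF f g ts' ntss vis = some (b, v) → ∃ ext, v = vis ++ ext

def GprodsP (f : Nat) : Prop := ∀ (g : List (String × List String)) (s : String)
    (ts : List String) (prods : List (String × List String))
    (vis : List (String × List String)) (b : Bool) (v : List (String × List String)),
    goProdsF f g s ts prods vis = some (b, v) → ∃ ext, v = vis ++ ext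

theorem Gcfg_zero : GcfgP 0 := by
  intro g s vis ts b v h
  simp [cfgAF] at h

theorem Gcfg_succ (f : Nat) (IH : GprodsP f) : GcfgP (f + 1) := by
  intro g s vis ts b v h
  simp only [cfgAF] at h
  by_cases hc : (vis.map Prod.fst).contains s = true
  · rw [if_pos hc] at h
    cases Option.some.inj h
    exact ⟨[], by simp⟩
  · rw [if_neg hc] at h
    rcases IH g s ts (g.filter (fun x => x.1 == s)) (vis ++ [(s, ts)]) b v h with ⟨ext, hext⟩
    exact ⟨(s, ts) :: ext, by rw [hext, List.append_assoc]; rfl⟩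

theorem Gnts_step (f : Nat) (hcfg : GcfgP f) : GntsP f := by
  intro g ts' ntss
  induction ntss with
  | nil =>
    intro vis b v h
    simp only [goNtsF] at h
    cases Option.some.inj h
    exact ⟨[], by simp⟩
  | cons n rest' ih =>
    intro vis b v h
    simp only [goNtsF] at h
    cases hcall : cfgAF f g n vis ts' with
    | none => rw [hcall] at h; simp at h
    | some pr =>
      obtain ⟨b1, v1⟩ := pr
      rw [hcall] at h
      rcases hcfg g n vis ts' b1 v1 hcall with ⟨ext1, hext1⟩
      cases b1 with
      | true =>
        simp at h
        obtain ⟨hb, hv⟩ := h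
        subst hv
        exact ⟨ext1, hext1⟩
      | false =>
        simp at h
        rcases ih v1 b v h with ⟨ext2, hext2⟩
        exact ⟨ext1 ++ ext2, by rw [hext2, hext1, List.append_assoc]⟩

theorem Gprods_step (f : Nat) (hnts : GntsP f) : GprodsP f := by
  intro g s ts prods
  induction prods with
  | nil =>
    intro vis b v h
    simp only [goProdsF] at h
    cases Option.some.inj h
    exact ⟨[], by simp⟩
  | cons gr rest' ih =>
    intro vis b v h
    simp only [goProdsF] at h
    cases hcall : goNtsF f g (ts ++ gr.2.filter (fun x => is_ts x g))
        (gr.2.filter (fun x => !is_ts x g)) vis with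
    | none => rw [hcall] at h; simp at h
    | some pr =>
      obtain ⟨b1, v1⟩ := pr
      rw [hcall] at h
      rcases hnts g (ts ++ gr.2.filter (fun x => is_ts x g))
        (gr.2.filter (fun x => !is_ts x g)) vis b1 v1 hcall with ⟨ext1, hext1⟩
      cases b1 with
      | true =>
        simp at h
        obtain ⟨hb, hv⟩ := h
        subst hv
        exact ⟨ext1, hext1⟩
      | false =>
        simp at h
        rcases ih v1 b v h with ⟨ext2, hext2⟩
        exact ⟨ext1 ++ ext2, by rw [hext2, hext1, List.append_assoc]⟩

theorem grow_all (f : Nat) : GcfgP f ∧ GntsP f ∧ GprodsP f := by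
  induction f with
  | zero => exact ⟨Gcfg_zero, Gnts_step 0 Gcfg_zero, Gprods_step 0 (Gnts_step 0 Gcfg_zero)⟩
  | succ f ih =>
    have hc := Gcfg_succ f ih.2.2
    exact ⟨hc, Gnts_step _ hc, Gprods_step _ (Gnts_step _ hc)⟩

-- ---- fuel grammar.length + 1 is sufficient for A's recursion ----
def ScfgP (f : Nat) : Prop := ∀ (g : List (String × List String)) (s : String)
    (vis : List (String × List String)) (ts : List String),
    muB g vis < f → (cfgAF f g s vis ts).isSome = true

def SntsP (f : Nat) : Prop := ∀ (g : List (String × List String)) (ts' : List String)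
    (ntss : List String) (vis : List (String × List String)),
    muB g vis < f → (goNtsF f g ts' ntss vis).isSome = true

def SprodsP (f : Nat) : Prop := ∀ (g : List (String × List String)) (s : String)
    (ts : List String) (prods : List (String × List String))
    (vis : List (String × List String)),
    (prods = [] ∨ muB g vis < f) → (goProdsF f g s ts prods vis).isSome = true

theorem Scfg_zero : ScfgP 0 := by
  intro g s vis ts hmu
  omega

theorem Scfg_succ (f : Nat) (IH : SprodsP f) : ScfgP (f + 1) := by
  intro g s vis ts hmu
  simp only [cfgAF]
  by_cases hc : (vis.map Prod.fst).contains s = true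
  · rw [if_pos hc]; rfl
  · rw [if_neg hc]
    cases hprods : g.filter (fun x => x.1 == s) with
    | nil =>
      exact IH g s ts [] (vis ++ [(s, ts)]) (Or.inl rfl)
    | cons gr tl =>
      have hgr : gr ∈ g.filter (fun x => x.1 == s) := by rw [hprods]; simp
      have hhead : s ∈ g.map Prod.fst := by
        rcases List.mem_filter.mp hgr with ⟨hg, hbeq⟩
        exact List.mem_map.mpr ⟨gr, hg, by simpa using hbeq⟩
      have hnv : ¬ s ∈ vis.map Prod.fst := by
        intro hmem
        exact hc (by simpa [List.contains_eq_mem] using hmem)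
      have hlt := muB_append_head_lt g vis s ts hhead hnv
      exact IH g s ts (gr :: tl) (vis ++ [(s, ts)]) (Or.inr (by omega))

theorem Snts_step (f : Nat) (hcfg : ScfgP f) (hgrow : GcfgP f) : SntsP f := by
  intro g ts' ntss
  induction ntss with
  | nil =>
    intro vis hmu
    simp [goNtsF]
  | cons n rest' ih =>
    intro vis hmu
    simp only [goNtsF]
    have hs := hcfg g n vis ts' hmu
    rcases Option.isSome_iff_exists.mp hs with ⟨⟨b1, v1⟩, hcall⟩
    rw [hcall]
    rcases hgrow g n vis ts' b1 v1 hcall with ⟨ext, hext⟩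
    have hmu1 : muB g v1 < f := by
      have := muB_append_le g vis ext
      rw [← hext] at this
      omega
    cases b1 with
    | true => rfl
    | false => exact ih v1 hmu1

theorem Sprods_step (f : Nat) (hnts : SntsP f) (hgnts : GntsP f) : SprodsP f := by
  intro g s ts prods
  induction prods with
  | nil =>
    intro vis _
    simp [goProdsF]
  | cons gr rest' ih =>
    intro vis hyp
    rcases hyp with h0 | hmu
    · exact absurd h0 (by simp)
    simp only [goProdsF]
    have hs := hnts g (ts ++ gr.2.filter (fun x => is_ts x g))
      (gr.2.filter (fun x => !is_ts x g)) vis hmu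
    rcases Option.isSome_iff_exists.mp hs with ⟨⟨b1, v1⟩, hcall⟩
    rw [hcall]
    rcases hgnts g (ts ++ gr.2.filter (fun x => is_ts x g))
      (gr.2.filter (fun x => !is_ts x g)) vis b1 v1 hcall with ⟨ext, hext⟩
    have hmu1 : muB g v1 < f := by
      have := muB_append_le g vis ext
      rw [← hext] at this
      omega
    cases b1 with
    | true => rfl
    | false => exact ih v1 (Or.inr hmu1)

theorem suff_all (f : Nat) : ScfgP f ∧ SntsP f ∧ SprodsP f := by
  induction f with
  | zero =>
    exact ⟨Scfg_zero, Snts_step 0 Scfg_zero Gcfg_zero,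
      Sprods_step 0 (Snts_step 0 Scfg_zero Gcfg_zero) (grow_all 0).2.1⟩
  | succ f ih =>
    have hc := Scfg_succ f ih.2.2
    exact ⟨hc, Snts_step _ hc (grow_all _).1,
      Sprods_step _ (Snts_step _ hc (grow_all _).1) (grow_all _).2.1⟩

-- ---- assembly ----
theorem cfgcheck_main (g : List (String × List String)) (s : String)
    (vis : List (String × List String)) (ts : List String) :
    cfgcheck g s vis ts = cfgcheck_alt g s vis ts := by
  have hmu : muB g vis < g.length + 1 := by
    have h1 : muB g vis ≤ (PySem.List.dedup (g.map Prod.fst)).length := by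
      unfold muB
      exact List.length_filter_le _ _
    have h2 : (PySem.List.dedup (g.map Prod.fst)).length ≤ (g.map Prod.fst).length := by
      rw [PySem.List.dedup_eq_ofList]
      exact PySem.Set.length_ofList_le _
    rw [List.length_map] at h2
    omega
  have hs := (suff_all (g.length + 1)).1 g s vis ts hmu
  rcases Option.isSome_iff_exists.mp hs with ⟨⟨b, v⟩, hcall⟩
  have hA : cfgcheck g s vis ts = b := by
    unfold cfgcheck
    rw [hcall]
    rfl
  have hB := (sim_all (g.length + 1)).1 g s vis ts b v hcall []
  rw [loopB_nil] at hB
  unfold cfgcheck_alt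
  rw [hA, hB]
  cases b <;> simp

-- ===== VERDICT (by name: the statement is the Claim_ definition above) =====
theorem cfgcheck_spec : Claim_equal_cfgcheck := by
  intro g s vis ts _
  unfold Spec_cfgcheck
  exact cfgcheck_main g s vis ts
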